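-- pv_equiv track=rewrite | github.com/lkjcalc/nAssembler | filedict.py | _abspath
-- ===== SOURCE A (Python) =====
-- def _abspath(curpath, path):
--     """
--     Assuming current directory is curpath, resolve path as far as possible.
--     """
--     if path.startswith('./'):
--         npath = path[2:]
--         return _abspath(curpath, npath)
--     elif not curpath:
--         return path
--     elif path.startswith('../'):
--         parpath = curpath[:curpath.rfind('/', 0, -1)+1]
--         npath = path[3:]
--         return _abspath(parpath, npath)
--     elif path.startswith('/'):
--         return path
--     else:
--         return curpath + path
-- ===== SOURCE B (Python) =====
-- def _abspath(curpath, path):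
--     """
--     Assuming current directory is curpath, resolve path as far as possible.
--     Two-phase rewrite: first tokenize the leading './'/'../' prefix of path in
--     one scan (recording the position of each '../'), then fold the '..' tokens
--     over curpath and finish with a single classification of the remainder.
--     """
--     ups = []            # absolute positions in path of the leading '../' tokens
--     pos = 0
--     while True:
--         if path.startswith('./', pos):
--             pos += 2
--         elif path.startswith('../', pos):
--             ups.append(pos)
--             pos += 3
--         else:
--             break
--     for p in ups:
--         if not curpath:
--             return path[p:]
--         curpath = curpath[:curpath.rfind('/', 0, -1) + 1]
--     rest = path[pos:]
--     if not curpath: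
--         return rest
--     if rest.startswith('/'):
--         return rest
--     return curpath + rest
-- ===== Notes on version B (the rewrite author's own statement) =====
-- stated objective: alternative
-- what changed: A's single tail recursion is split into two phases: one scan tokenizes the leading './'/'../' prefix of path (recording each '../' position), then a separate fold applies the '..' tokens to curpath and a final classification handles the remainder.
import Mathlib
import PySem

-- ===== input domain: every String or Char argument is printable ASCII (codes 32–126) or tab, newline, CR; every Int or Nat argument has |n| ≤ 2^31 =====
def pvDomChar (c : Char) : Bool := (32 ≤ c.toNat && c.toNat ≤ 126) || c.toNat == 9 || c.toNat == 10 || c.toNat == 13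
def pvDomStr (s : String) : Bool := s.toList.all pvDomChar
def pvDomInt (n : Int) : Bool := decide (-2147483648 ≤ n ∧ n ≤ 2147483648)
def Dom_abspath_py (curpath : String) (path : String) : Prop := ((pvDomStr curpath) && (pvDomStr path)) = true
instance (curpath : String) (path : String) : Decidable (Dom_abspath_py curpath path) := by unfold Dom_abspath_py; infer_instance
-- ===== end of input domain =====

-- B re-decomposes A's tail recursion into two phases (tokenize the './'/'../' prefix, then
-- fold the '..' tokens over curpath); alternative decomposition, same cost.

-- ===== PORT A =====
-- curpath.rfind('/', 0, -1): largest index of '/' in curpath[0:len-1], or -1 (exact).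
def rfindSlashAux : List Char → Int → Int → Int
  | [], _, acc => acc
  | c :: cs, i, acc => rfindSlashAux cs (i + 1) (if c = '/' then i else acc)

-- curpath[:curpath.rfind('/', 0, -1) + 1] (exact; the index + 1 is ≥ 0 so toNat is safe)
def parentChars (cs : List Char) : List Char :=
  cs.take (rfindSlashAux cs.dropLast 0 (-1) + 1).toNat

-- path.startswith(t) is ported as take-compare on the char list (exact); '' is falsy → cur = []
def abspathCore (cur p : List Char) : List Char :=
  if p.take 2 = ['.', '/'] then abspathCore cur (p.drop 2)
  else if cur = [] then p
  else if p.take 3 = ['.', '.', '/'] then abspathCore (parentChars cur) (p.drop 3)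
  else if p.take 1 = ['/'] then p
  else cur ++ p
termination_by p.length
decreasing_by
  · have := congrArg List.length (by assumption : p.take 2 = ['.', '/'])
    simp at this ⊢; omega
  · have := congrArg List.length (by assumption : p.take 3 = ['.', '.', '/'])
    simp at this ⊢; omega

def abspath_py (curpath : String) (path : String) : String :=
  String.mk (abspathCore curpath.toList path.toList)

-- ===== PORT B =====
-- phase 1 of Source B: one scan over path collecting the positions of the leading '../' tokens
-- (ups) and the end position of the prefix; recursion on the suffix s = path[pos:].
def tokenizeB (s : List Char) (pos : Nat) : List Nat × Nat :=
  if s.take 2 = ['.', '/'] then tokenizeB (s.drop 2) (pos + 2)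
  else if s.take 3 = ['.', '.', '/'] then
    let r := tokenizeB (s.drop 3) (pos + 3)
    (pos :: r.1, r.2)
  else ([], pos)
termination_by s.length
decreasing_by
  · have := congrArg List.length (by assumption : s.take 2 = ['.', '/'])
    simp at this ⊢; omega
  · have := congrArg List.length (by assumption : s.take 3 = ['.', '.', '/'])
    simp at this ⊢; omega

-- Source B's final classification of the remainder
def finishB (cur rest : List Char) : List Char :=
  if cur = [] then rest
  else if rest.take 1 = ['/'] then rest
  else cur ++ rest

-- phase 2 of Source B: fold the '..' token positions over curpath
def popLoopB (path : List Char) (endPos : Nat) : List Char → List Nat → List Char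
  | cur, [] => finishB cur (path.drop endPos)
  | cur, p :: ps => if cur = [] then path.drop p else popLoopB path endPos (parentChars cur) ps

def abspath_py_alt (curpath : String) (path : String) : String :=
  let r := tokenizeB path.toList 0
  String.mk (popLoopB path.toList r.2 curpath.toList r.1)

-- ===== PRECONDITION & SPEC =====
def Spec_abspath_py (curpath : String) (path : String) (out : String) : Prop := out = abspath_py_alt curpath path
instance (curpath : String) (path : String) (out : String) : Decidable (Spec_abspath_py curpath path out) := by unfold Spec_abspath_py; infer_instance

-- ===== CLAIM (what is proved, stated in full; the proofs are below) =====
def Claim_equal_abspath_py : Prop := ∀ (curpath : String) (path : String), Dom_abspath_py curpath path → Spec_abspath_py curpath path (abspath_py curpath path)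

-- ===== LEMMAS AND PROOFS =====
-- The invariant: on the suffix s = full.drop pos, A's recursion equals phase-1-then-phase-2 of B.
theorem core_eq : ∀ (n : Nat) (s : List Char), s.length ≤ n → ∀ (pos : Nat) (cur full : List Char),
    full.drop pos = s →
    abspathCore cur s = popLoopB full (tokenizeB s pos).2 cur (tokenizeB s pos).1 := by
  intro n
  induction n with
  | zero =>
    intro s hs pos cur full hf
    have hsnil : s = [] := List.eq_nil_of_length_eq_zero (Nat.le_zero.mp hs)
    subst hsnil
    rw [abspathCore, tokenizeB]
    simp [popLoopB, finishB, hf]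
  | succ n ih =>
    intro s hs pos cur full hf
    by_cases h2 : s.take 2 = ['.', '/']
    · have hlen : 2 ≤ s.length := by
        have := congrArg List.length h2; simp at this; omega
      have hd : full.drop (pos + 2) = s.drop 2 := by
        rw [← hf, List.drop_drop]
      rw [abspathCore, tokenizeB]
      simp only [h2, if_pos]
      exact ih (s.drop 2) (by simp; omega) (pos + 2) cur full hd
    · by_cases h3 : s.take 3 = ['.', '.', '/']
      · have hlen : 3 ≤ s.length := by
          have := congrArg List.length h3; simp at this; omega
        have hd : full.drop (pos + 3) = s.drop 3 := by
          rw [← hf, List.drop_drop]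
        rw [abspathCore, tokenizeB]
        simp only [h2, h3, if_pos, if_false]
        by_cases hc : cur = []
        · simp [hc, popLoopB, hf]
        · simp only [hc, if_false, popLoopB]
          exact ih (s.drop 3) (by simp; omega) (pos + 3) (parentChars cur) full hd
      · rw [abspathCore, tokenizeB]
        simp only [h2, h3, if_false]
        by_cases hc : cur = []
        · simp [hc, popLoopB, finishB, hf]
        · simp [hc, popLoopB, finishB, hf]

-- ===== VERDICT (by name: the statement is the Claim_ definition above) =====
theorem abspath_py_spec : Claim_equal_abspath_py := by
  intro curpath path _
  unfold Spec_abspath_py abspath_py abspath_py_alt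
  have := core_eq path.toList.length path.toList (le_refl _) 0 curpath.toList path.toList
    List.drop_zero
  rw [this]
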